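-- pv_equiv track=rewrite | github.com/hasithapethum/Image-Labelling | vision.py | categorize_and_caption
-- ===== SOURCE A (Python) =====
-- def categorize_and_caption(folder_name):
--     """Categorize the folder and return appropriate category and subject"""
--     folder_lower = folder_name.lower()
--
--     # Wildlife categories
--     if any(word in folder_lower for word in ['junglefowl', 'elephant', 'cat', 'fishing_cat', 'bird']):
--         return 'wildlife', folder_name.replace('_', ' ')
--
--     # Architecture categories
--     elif any(word in folder_lower for word in ['fort', 'temple', 'mosque', 'station', 'tower', 'airport', 'hospital', 'houses']):
--         return 'architecture', folder_name.replace('_', ' ')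
--
--     # Landscape categories
--     elif any(word in folder_lower for word in ['falls', 'beach', 'bay', 'plains', 'mountain', 'lake', 'island', 'rainforest', 'national_park']):
--         return 'landscape', folder_name.replace('_', ' ')
--
--     # Cultural/craft categories
--     elif any(word in folder_lower for word in ['weaving', 'craft', 'carving', 'lace', 'dance', 'drummers', 'perahera']):
--         return 'cultural', folder_name.replace('_', ' ')
--
--     # Food categories
--     elif any(word in folder_lower for word in ['thiyal', 'kottu', 'roti', 'kiribath', 'lamprais', 'hopper']):
--         return 'food', folder_name.replace('_', ' ')
--
--     # Default to cultural
--     else: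
--         return 'cultural', folder_name.replace('_', ' ')
-- ===== SOURCE B (Python) =====
-- # Text-driven multi-pattern scan: instead of testing each keyword against the
-- # string, walk the string once and hash-look-up each substring of a keyword
-- # length in a keyword->priority-rank map, keeping the smallest rank seen.
-- _RANK = {
--     'junglefowl': 0, 'elephant': 0, 'cat': 0, 'fishing_cat': 0, 'bird': 0,
--     'fort': 1, 'temple': 1, 'mosque': 1, 'station': 1, 'tower': 1,
--     'airport': 1, 'hospital': 1, 'houses': 1,
--     'falls': 2, 'beach': 2, 'bay': 2, 'plains': 2, 'mountain': 2,
--     'lake': 2, 'island': 2, 'rainforest': 2, 'national_park': 2,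
--     'weaving': 3, 'craft': 3, 'carving': 3, 'lace': 3, 'dance': 3,
--     'drummers': 3, 'perahera': 3,
--     'thiyal': 4, 'kottu': 4, 'roti': 4, 'kiribath': 4, 'lamprais': 4,
--     'hopper': 4,
-- }
-- _CATS = ['wildlife', 'architecture', 'landscape', 'cultural', 'food']
-- _LENGTHS = [3, 4, 5, 6, 7, 8, 10, 11, 13]  # the distinct keyword lengths
--
--
-- def categorize_and_caption(folder_name):
--     """Categorize the folder and return appropriate category and subject"""
--     s = folder_name.lower()
--     best = None
--     for i in range(len(s)):
--         for L in _LENGTHS: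
--             r = _RANK.get(s[i:i + L])
--             if r is not None and (best is None or r < best):
--                 best = r
--     cat = _CATS[best] if best is not None else 'cultural'
--     return cat, folder_name.replace('_', ' ')
-- ===== Notes on version B (the rewrite author's own statement) =====
-- stated objective: alternative
-- what changed: Instead of testing each keyword group against the string with an if/elif chain, B walks the string once and hash-looks-up every substring of a keyword length in a keyword-to-priority-rank map, returning the category of the smallest rank found (default cultural).
import Mathlib
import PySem

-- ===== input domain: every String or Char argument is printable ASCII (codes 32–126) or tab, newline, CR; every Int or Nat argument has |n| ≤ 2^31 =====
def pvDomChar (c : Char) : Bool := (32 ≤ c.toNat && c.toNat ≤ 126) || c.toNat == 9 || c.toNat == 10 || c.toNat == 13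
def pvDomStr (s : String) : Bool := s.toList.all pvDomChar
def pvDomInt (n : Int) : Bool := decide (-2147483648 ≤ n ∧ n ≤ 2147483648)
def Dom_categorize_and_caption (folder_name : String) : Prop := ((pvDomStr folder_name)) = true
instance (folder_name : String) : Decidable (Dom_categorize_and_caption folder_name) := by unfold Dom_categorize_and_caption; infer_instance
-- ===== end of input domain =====

-- B replaces A's keyword-by-keyword if/elif chain with a single text-driven scan: every substring of a keyword length is
-- looked up in a keyword->priority-rank map and the smallest rank seen decides the category (alternative algorithm).


-- ===== PORT A =====
-- literal transliteration of the if/elif chain; 'word in folder_lower' = PySem.Str.isIn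
def categorize_and_caption (folder_name : String) : String × String :=
  let folder_lower := PySem.Str.lower folder_name
  if (["junglefowl", "elephant", "cat", "fishing_cat", "bird"].any
      (fun word => PySem.Str.isIn word folder_lower)) then
    ("wildlife", PySem.Str.replace folder_name "_" " ")
  else if (["fort", "temple", "mosque", "station", "tower", "airport", "hospital", "houses"].any
      (fun word => PySem.Str.isIn word folder_lower)) then
    ("architecture", PySem.Str.replace folder_name "_" " ")
  else if (["falls", "beach", "bay", "plains", "mountain", "lake", "island", "rainforest", "national_park"].any
      (fun word => PySem.Str.isIn word folder_lower)) then
    ("landscape", PySem.Str.replace folder_name "_" " ")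
  else if (["weaving", "craft", "carving", "lace", "dance", "drummers", "perahera"].any
      (fun word => PySem.Str.isIn word folder_lower)) then
    ("cultural", PySem.Str.replace folder_name "_" " ")
  else if (["thiyal", "kottu", "roti", "kiribath", "lamprais", "hopper"].any
      (fun word => PySem.Str.isIn word folder_lower)) then
    ("food", PySem.Str.replace folder_name "_" " ")
  else
    ("cultural", PySem.Str.replace folder_name "_" " ")

-- ===== PORT B =====
-- B's module constants: _RANK (keyword -> priority rank), _CATS, _LENGTHS (the distinct keyword lengths)
def pvRank : PySem.Dict String Nat :=
  PySem.Dict.ofList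
    [("junglefowl", 0), ("elephant", 0), ("cat", 0), ("fishing_cat", 0), ("bird", 0),
     ("fort", 1), ("temple", 1), ("mosque", 1), ("station", 1), ("tower", 1),
     ("airport", 1), ("hospital", 1), ("houses", 1),
     ("falls", 2), ("beach", 2), ("bay", 2), ("plains", 2), ("mountain", 2),
     ("lake", 2), ("island", 2), ("rainforest", 2), ("national_park", 2),
     ("weaving", 3), ("craft", 3), ("carving", 3), ("lace", 3), ("dance", 3),
     ("drummers", 3), ("perahera", 3),
     ("thiyal", 4), ("kottu", 4), ("roti", 4), ("kiribath", 4), ("lamprais", 4),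
     ("hopper", 4)]

def pvCats : List String := ["wildlife", "architecture", "landscape", "cultural", "food"]

def pvLengths : List Nat := [3, 4, 5, 6, 7, 8, 10, 11, 13]

def categorize_and_caption_alt (folder_name : String) : String × String :=
  let s := PySem.Str.lower folder_name
  let best := (PySem.List.pyRange 0 ((PySem.Str.len s : Int)) 1).foldl
    (fun best i =>
      pvLengths.foldl (fun best (L : Nat) =>
        match pvRank.get? (PySem.Str.slice s (some i) (some (i + (L : Int)))) with
        | some r =>
          match best with
          | none => some r
          | some b => if r < b then some r else some b
        | none => best) best)
    none
  let cat := match best with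
    | some b => pvCats.getD b "cultural"   -- b is provably < 5, so Python's _CATS[best] never raises
    | none => "cultural"
  (cat, PySem.Str.replace folder_name "_" " ")

-- ===== PRECONDITION & SPEC =====
def Spec_categorize_and_caption (folder_name : String) (out : String × String) : Prop := out = categorize_and_caption_alt folder_name
instance (folder_name : String) (out : String × String) : Decidable (Spec_categorize_and_caption folder_name out) := by unfold Spec_categorize_and_caption; infer_instance

-- ===== CLAIM (what is proved, stated in full; the proofs are below) =====
def Claim_equal_categorize_and_caption : Prop := ∀ (folder_name : String), Dom_categorize_and_caption folder_name → Spec_categorize_and_caption folder_name (categorize_and_caption folder_name)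

-- ===== LEMMAS AND PROOFS =====

-- pvRank's items as a flat association list (for membership reasoning)
def pvPairs : List (String × Nat) :=
  [("junglefowl", 0), ("elephant", 0), ("cat", 0), ("fishing_cat", 0), ("bird", 0),
   ("fort", 1), ("temple", 1), ("mosque", 1), ("station", 1), ("tower", 1),
   ("airport", 1), ("hospital", 1), ("houses", 1),
   ("falls", 2), ("beach", 2), ("bay", 2), ("plains", 2), ("mountain", 2),
   ("lake", 2), ("island", 2), ("rainforest", 2), ("national_park", 2),
   ("weaving", 3), ("craft", 3), ("carving", 3), ("lace", 3), ("dance", 3),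
   ("drummers", 3), ("perahera", 3),
   ("thiyal", 4), ("kottu", 4), ("roti", 4), ("kiribath", 4), ("lamprais", 4),
   ("hopper", 4)]

set_option maxRecDepth 10000 in
lemma pvRank_items : pvRank.items = pvPairs := by decide

set_option maxRecDepth 10000 in
lemma pvRank_nodup : pvRank.keys.Nodup := by decide

lemma pvRank_get?_iff (k : String) (r : Nat) :
    pvRank.get? k = some r ↔ (k, r) ∈ pvPairs := by
  rw [PySem.Dict.get?_eq_some_iff_mem_items _ _ _ pvRank_nodup, pvRank_items]

-- the running 'best' update is an option-valued min
def pvOmin : Option Nat → Option Nat → Option Nat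
  | none, b => b
  | some a, none => some a
  | some a, some b => some (min a b)

lemma pvStep_eq (b : Option Nat) (r? : Option Nat) :
    (match r? with
     | some r =>
       match b with
       | none => some r
       | some bb => if r < bb then some r else some bb
     | none => b) = pvOmin b r? := by
  cases r? with
  | none => cases b <;> rfl
  | some r =>
    cases b with
    | none => rfl
    | some bb =>
      simp only [pvOmin]
      split_ifs with h <;> simp [Nat.min_def] <;> omega

lemma pvOmin_none_right (a : Option Nat) : pvOmin a none = a := by cases a <;> rfl

lemma pvFoldl_omin {α : Type} (g : α → Option Nat) (l : List α) (acc : Option Nat) :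
    l.foldl (fun b x => pvOmin b (g x)) acc = pvOmin acc (l.filterMap g).min? := by
  induction l generalizing acc with
  | nil => simp [pvOmin_none_right]
  | cons x xs ih =>
    cases hg : g x with
    | none => simp [List.foldl_cons, hg, ih, pvOmin_none_right]
    | some r =>
      simp only [List.foldl_cons, hg, ih, List.filterMap_cons, List.min?_cons]
      cases acc <;> cases h : (xs.filterMap g).min? <;>
        simp [pvOmin, Option.elim, Nat.min_assoc]

-- 'rank r has a hit in s' = some keyword of rank r occurs in s
def pvHit (s : String) (r : Nat) : Prop :=
  ∃ w, (w, r) ∈ pvPairs ∧ PySem.Str.isIn w s = true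

lemma pvPairs_facts : ∀ p ∈ pvPairs, p.1.toList.length ∈ pvLengths ∧ p.1.toList ≠ [] ∧ p.2 < 5 := by decide

-- the scan finds rank r somewhere iff some keyword of rank r is a substring
lemma pvHit_iff (s : String) (r : Nat) :
    (∃ i ∈ PySem.List.pyRange 0 ((PySem.Str.len s : Int)) 1, ∃ L ∈ pvLengths,
       pvRank.get? (PySem.Str.slice s (some i) (some (i + (L : Int)))) = some r)
    ↔ pvHit s r := by
  constructor
  · rintro ⟨i, hi, L, _, hget⟩
    rw [PySem.List.mem_pyRange_one] at hi
    obtain ⟨j, rfl⟩ := Int.eq_ofNat_of_zero_le hi.1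
    rw [pvRank_get?_iff] at hget
    refine ⟨_, hget, ?_⟩
    rw [PySem.Str.isIn_eq, ← PySem.Chars.exists_prefix_drop_iff_isIn]
    refine ⟨j, ?_⟩
    have : (PySem.Str.slice s (some (j : Int)) (some ((j : Int) + (L : Int)))).toList
        = (s.toList.drop j).take L := by
      rw [PySem.Str.toList_slice, PySem.Chars.slice_eq_listSlice,
        PySem.List.slice_natCast_add]
    rw [this]
    exact List.take_prefix _ _
  · rintro ⟨w, hw, hin⟩
    obtain ⟨hlen, hne, -⟩ := pvPairs_facts _ hw
    rw [PySem.Str.isIn_eq, ← PySem.Chars.exists_prefix_drop_iff_isIn] at hin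
    obtain ⟨j, hpre⟩ := hin
    have hjlt : j < s.toList.length := by
      by_contra h
      rw [List.drop_eq_nil_iff.mpr (by omega)] at hpre
      exact hne (List.prefix_nil.mp hpre)
    refine ⟨(j : Int), ?_, w.toList.length, hlen, ?_⟩
    · rw [PySem.List.mem_pyRange_one]
      have : PySem.Str.len s = s.toList.length := by
        simp [PySem.Str.len]
      omega
    · rw [pvRank_get?_iff]
      have hslice : PySem.Str.slice s (some (j : Int)) (some ((j : Int) + (w.toList.length : Int))) = w := by
        rw [← String.toList_inj, PySem.Str.toList_slice, PySem.Chars.slice_eq_listSlice,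
          PySem.List.slice_natCast_add]
        exact (List.prefix_iff_eq_take.mp hpre).symm
      rw [hslice]; exact hw

-- a group's any(...) test in A is exactly 'pvHit' at that group's rank
lemma pvGroup_any_iff (G : List String) (g : Nat) (t : String)
    (hsub : ∀ w ∈ G, (w, g) ∈ pvPairs)
    (hsup : ∀ p ∈ pvPairs, p.2 = g → p.1 ∈ G) :
    (G.any (fun w => PySem.Str.isIn w t) = true) ↔ pvHit t g := by
  rw [List.any_eq_true]
  constructor
  · rintro ⟨w, hw, hin⟩; exact ⟨w, hsub w hw, hin⟩
  · rintro ⟨w, hw, hin⟩; exact ⟨w, hsup _ hw rfl, hin⟩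

-- the nested min?-scan that B's fold computes
def pvBig (s : String) : Option Nat :=
  ((PySem.List.pyRange 0 ((PySem.Str.len s : Int)) 1).filterMap
    (fun i => (pvLengths.filterMap
      (fun (L : Nat) => pvRank.get? (PySem.Str.slice s (some i) (some (i + (L : Int)))))).min?)).min?

-- B's fold computes pvBig
set_option maxRecDepth 10000 in
lemma pvBest_characterization (s : String) :
    (PySem.List.pyRange 0 ((PySem.Str.len s : Int)) 1).foldl
      (fun best i =>
        pvLengths.foldl (fun best (L : Nat) =>
          match pvRank.get? (PySem.Str.slice s (some i) (some (i + (L : Int)))) with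
          | some r =>
            match best with
            | none => some r
            | some b => if r < b then some r else some b
          | none => best) best)
      none
    = pvBig s := by
  rw [pvBig]
  have hinner : ∀ (acc : Option Nat) (i : Int),
      pvLengths.foldl (fun best (L : Nat) =>
        match pvRank.get? (PySem.Str.slice s (some i) (some (i + (L : Int)))) with
        | some r =>
          match best with
          | none => some r
          | some b => if r < b then some r else some b
        | none => best) acc
      = pvOmin acc ((pvLengths.filterMap
          (fun (L : Nat) => pvRank.get? (PySem.Str.slice s (some i) (some (i + (L : Int)))))).min?) := by
    intro acc i
    rw [← pvFoldl_omin]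
    exact PySem.List.foldl_congr_mem _ _ _ _ (fun b L _ => pvStep_eq b _)
  calc (PySem.List.pyRange 0 ((PySem.Str.len s : Int)) 1).foldl _ none
      = (PySem.List.pyRange 0 ((PySem.Str.len s : Int)) 1).foldl
          (fun acc i => pvOmin acc ((pvLengths.filterMap
            (fun (L : Nat) => pvRank.get? (PySem.Str.slice s (some i) (some (i + (L : Int)))))).min?)) none := by
        exact PySem.List.foldl_congr_mem _ _ _ _ (fun acc i _ => hinner acc i)
    _ = _ := by rw [pvFoldl_omin]; rfl

-- if the scan finds nothing, no keyword occurs at all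
lemma pvBig_none (s : String) (h : pvBig s = none) : ∀ r, ¬ pvHit s r := by
  rw [pvBig, List.min?_eq_none_iff, List.filterMap_eq_nil_iff] at h
  intro r hr
  rw [← pvHit_iff] at hr
  obtain ⟨i, hi, L, hL, hget⟩ := hr
  have hinner := h i hi
  rw [List.min?_eq_none_iff, List.filterMap_eq_nil_iff] at hinner
  rw [hinner L hL] at hget
  simp at hget

-- if the scan returns r, then r is a hit and is minimal among hits
lemma pvBig_some (s : String) (r : Nat) (h : pvBig s = some r) :
    pvHit s r ∧ ∀ r', pvHit s r' → r ≤ r' := by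
  rw [pvBig] at h
  obtain ⟨hmem, hmin⟩ := List.min?_eq_some_iff.mp h
  rw [List.mem_filterMap] at hmem
  obtain ⟨i, hi, hmi⟩ := hmem
  obtain ⟨hm, -⟩ := List.min?_eq_some_iff.mp hmi
  rw [List.mem_filterMap] at hm
  obtain ⟨L, hL, hg⟩ := hm
  refine ⟨(pvHit_iff s r).mp ⟨i, hi, L, hL, hg⟩, ?_⟩
  intro r' hr'
  rw [← pvHit_iff] at hr'
  obtain ⟨i', hi', L', hL', hg'⟩ := hr'
  have hmem' : r' ∈ pvLengths.filterMap
      (fun (L : Nat) => pvRank.get? (PySem.Str.slice s (some i') (some (i' + (L : Int))))) :=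
    List.mem_filterMap.mpr ⟨L', hL', hg'⟩
  cases hinner : (pvLengths.filterMap
      (fun (L : Nat) => pvRank.get? (PySem.Str.slice s (some i') (some (i' + (L : Int)))))).min? with
  | none =>
    rw [List.min?_eq_none_iff] at hinner
    rw [hinner] at hmem'
    exact absurd hmem' (List.not_mem_nil)
  | some r'' =>
    obtain ⟨-, hle⟩ := List.min?_eq_some_iff.mp hinner
    exact le_trans (hmin _ (List.mem_filterMap.mpr ⟨i', hi', hinner⟩)) (hle _ hmem')

-- ===== VERDICT (by name: the statement is the Claim_ definition above) =====
set_option maxRecDepth 10000 in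
theorem categorize_and_caption_spec : Claim_equal_categorize_and_caption := by
  intro fn _
  unfold Spec_categorize_and_caption
  simp only [categorize_and_caption, categorize_and_caption_alt]
  rw [pvBest_characterization]
  cases hb : pvBig (PySem.Str.lower fn) with
  | none =>
    have hno := pvBig_none _ hb
    split_ifs with c0 c1 c2 c3 c4
    · exact absurd ((pvGroup_any_iff _ 0 _ (by decide) (by decide)).mp c0) (hno 0)
    · exact absurd ((pvGroup_any_iff _ 1 _ (by decide) (by decide)).mp c1) (hno 1)
    · exact absurd ((pvGroup_any_iff _ 2 _ (by decide) (by decide)).mp c2) (hno 2)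
    · exact absurd ((pvGroup_any_iff _ 3 _ (by decide) (by decide)).mp c3) (hno 3)
    · exact absurd ((pvGroup_any_iff _ 4 _ (by decide) (by decide)).mp c4) (hno 4)
    · rfl
  | some r =>
    obtain ⟨hhit, hmin⟩ := pvBig_some _ _ hb
    have hr5 : r < 5 := by
      obtain ⟨w, hw, -⟩ := hhit
      exact (pvPairs_facts _ hw).2.2
    interval_cases r
    · -- r = 0: the wildlife branch fires
      split_ifs with c0 c1 c2 c3 c4
      · rfl
      all_goals exact absurd ((pvGroup_any_iff _ 0 _ (by decide) (by decide)).mpr hhit) c0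
    · -- r = 1
      split_ifs with c0 c1 c2 c3 c4
      · exact absurd (hmin 0 ((pvGroup_any_iff _ 0 _ (by decide) (by decide)).mp c0)) (by omega)
      · rfl
      all_goals exact absurd ((pvGroup_any_iff _ 1 _ (by decide) (by decide)).mpr hhit) c1
    · -- r = 2
      split_ifs with c0 c1 c2 c3 c4
      · exact absurd (hmin 0 ((pvGroup_any_iff _ 0 _ (by decide) (by decide)).mp c0)) (by omega)
      · exact absurd (hmin 1 ((pvGroup_any_iff _ 1 _ (by decide) (by decide)).mp c1)) (by omega)
      · rfl
      all_goals exact absurd ((pvGroup_any_iff _ 2 _ (by decide) (by decide)).mpr hhit) c2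
    · -- r = 3
      split_ifs with c0 c1 c2 c3 c4
      · exact absurd (hmin 0 ((pvGroup_any_iff _ 0 _ (by decide) (by decide)).mp c0)) (by omega)
      · exact absurd (hmin 1 ((pvGroup_any_iff _ 1 _ (by decide) (by decide)).mp c1)) (by omega)
      · exact absurd (hmin 2 ((pvGroup_any_iff _ 2 _ (by decide) (by decide)).mp c2)) (by omega)
      · rfl
      all_goals exact absurd ((pvGroup_any_iff _ 3 _ (by decide) (by decide)).mpr hhit) c3
    · -- r = 4
      split_ifs with c0 c1 c2 c3 c4
      · exact absurd (hmin 0 ((pvGroup_any_iff _ 0 _ (by decide) (by decide)).mp c0)) (by omega)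
      · exact absurd (hmin 1 ((pvGroup_any_iff _ 1 _ (by decide) (by decide)).mp c1)) (by omega)
      · exact absurd (hmin 2 ((pvGroup_any_iff _ 2 _ (by decide) (by decide)).mp c2)) (by omega)
      · exact absurd (hmin 3 ((pvGroup_any_iff _ 3 _ (by decide) (by decide)).mp c3)) (by omega)
      · rfl
      · exact absurd ((pvGroup_any_iff _ 4 _ (by decide) (by decide)).mpr hhit) c4
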